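-- pv_equiv track=rewrite | github.com/Vetrivelmaran/function_programs | 12_che_list_ordr.py | check
-- ===== SOURCE A (Python) =====
-- def check(a):
--     count=0
--     for i in range(len(a)):
--         for j in range(i+1,len(a)):
--             if a[i]<a[j]:
--                 count+=1
--                 break
--     if count==len(a)-1:
--         return 'assendin'
--     else:
--         return 'desending'
-- ===== SOURCE B (Python) =====
-- def check(a):
--     # A's count equals len(a)-1 exactly when every element before the last is
--     # strictly smaller than the last element; test that in one pass.
--     if not a:
--         return 'desending'
--     last = a[-1]
--     return 'assendin' if all(x < last for x in a[:-1]) else 'desending'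
-- ===== Notes on version B (the rewrite author's own statement) =====
-- stated objective: faster
-- what changed: Replaced the quadratic nested index scan and count comparison by a one-pass test that every element before the last is strictly smaller than the last element, which is provably equivalent to A's count==len(a)-1 condition.
import Mathlib
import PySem

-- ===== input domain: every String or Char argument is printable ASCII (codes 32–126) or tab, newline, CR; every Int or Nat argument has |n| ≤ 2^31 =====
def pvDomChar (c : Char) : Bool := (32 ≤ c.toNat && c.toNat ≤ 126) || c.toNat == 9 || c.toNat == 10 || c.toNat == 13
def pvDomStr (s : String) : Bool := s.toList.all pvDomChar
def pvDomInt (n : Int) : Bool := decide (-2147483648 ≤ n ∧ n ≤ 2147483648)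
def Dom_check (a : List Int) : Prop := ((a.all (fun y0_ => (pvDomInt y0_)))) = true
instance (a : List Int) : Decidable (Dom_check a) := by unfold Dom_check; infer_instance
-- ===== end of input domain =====

-- B replaces A's nested index scan and count comparison by a one-pass test (every
-- element before the last is strictly smaller than the last), equal to A's result.

-- ===== PORT A =====
-- inner loop 'for j in range(i+1,len(a)): if a[i]<a[j]: count+=1; break'
-- (indices produced by range are always in bounds, so pyGetD with default 0 is exact here)
def checkInner (a : List Int) (ai : Int) : List Int → Int → Int
  | [], count => count
  | j :: rest, count =>
      if ai < PySem.List.pyGetD a j 0 then count + 1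
      else checkInner a ai rest count

def check (a : List Int) : String :=
  let n : Int := a.length
  let count : Int :=
    (PySem.List.pyRange 0 n 1).foldl
      (fun count i => checkInner a (PySem.List.pyGetD a i 0) (PySem.List.pyRange (i + 1) n 1) count) 0
  if count = n - 1 then "assendin" else "desending"

-- ===== PORT B =====
def check_alt (a : List Int) : String :=
  if h : a = [] then "desending"
  else
    let last := PySem.List.pyGetD a (-1) 0
    if (PySem.List.slice a none (some (-1))).all (fun x => decide (x < last)) then "assendin"
    else "desending"

-- ===== PRECONDITION & SPEC =====
def Spec_check (a : List Int) (out : String) : Prop := out = check_alt a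
instance (a : List Int) (out : String) : Decidable (Spec_check a out) := by unfold Spec_check; infer_instance

-- ===== CLAIM (what is proved, stated in full; the proofs are below) =====
def Claim_equal_check : Prop := ∀ (a : List Int), Dom_check a → Spec_check a (check a)

-- ===== LEMMAS AND PROOFS =====

-- 'index i has a later strictly greater element', as A's inner loop computes it
def Qb (a : List Int) (i : Int) : Bool :=
  (PySem.List.pyRange (i + 1) (a.length : Int) 1).any
    (fun j => decide (PySem.List.pyGetD a i 0 < PySem.List.pyGetD a j 0))

-- inner loop adds 1 iff some later index holds a strictly greater value
theorem checkInner_eq (a : List Int) (ai : Int) (js : List Int) (count : Int) :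
    checkInner a ai js count =
      count + (if js.any (fun j => decide (ai < PySem.List.pyGetD a j 0)) then 1 else 0) := by
  induction js generalizing count with
  | nil => simp [checkInner]
  | cons j rest ih =>
      by_cases h : ai < PySem.List.pyGetD a j 0 <;> simp [checkInner, h, ih]

-- the outer fold counts the indices satisfying Qb
theorem fold_count (a : List Int) (L : List Int) (c : Int) :
    L.foldl
      (fun count i => checkInner a (PySem.List.pyGetD a i 0)
        (PySem.List.pyRange (i + 1) (a.length : Int) 1) count) c
      = c + (L.countP (Qb a) : Int) := by
  induction L generalizing c with
  | nil => simp
  | cons x L ih =>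
      rw [List.foldl_cons, checkInner_eq, ih, List.countP_cons]
      have hq : ((PySem.List.pyRange (x + 1) ((a.length : Int)) 1).any
          (fun j => decide (PySem.List.pyGetD a x 0 < PySem.List.pyGetD a j 0))) = Qb a x := rfl
      rw [hq]
      by_cases h : Qb a x <;> simp [h] <;> omega

theorem Qb_nat_iff (a : List Int) (i : Nat) :
    Qb a (i : Int) = true ↔
      ∃ j : Nat, i < j ∧ j < a.length ∧ a.getD i 0 < a.getD j 0 := by
  simp only [Qb, List.any_eq_true, PySem.List.mem_pyRange_one, decide_eq_true_iff]
  constructor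
  · rintro ⟨j, ⟨h1, h2⟩, hlt⟩
    have h0 : 0 ≤ j := by omega
    lift j to Nat using h0
    rw [PySem.List.pyGetD_natCast, PySem.List.pyGetD_natCast] at hlt
    exact ⟨j, by omega, by exact_mod_cast h2, hlt⟩
  · rintro ⟨j, h1, h2, hlt⟩
    refine ⟨(j : Int), ⟨by omega, by exact_mod_cast h2⟩, ?_⟩
    rw [PySem.List.pyGetD_natCast, PySem.List.pyGetD_natCast]
    exact hlt

theorem Qb_last (a : List Int) (h : a ≠ []) :
    Qb a ((a.length - 1 : Nat) : Int) = false := by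
  have h1 : 1 ≤ a.length := List.length_pos_iff.mpr h
  have hempty : PySem.List.pyRange (((a.length - 1 : Nat) : Int) + 1) (a.length : Int) 1 = [] := by
    refine List.eq_nil_iff_forall_not_mem.mpr (fun x hx => ?_)
    rw [PySem.List.mem_pyRange_one] at hx
    omega
  unfold Qb
  rw [hempty]
  rfl

-- if every index before the last has a later strictly greater element,
-- then every such index is strictly below the last element (downward induction)
theorem all_lt_last (a : List Int) (n : Nat) (hn : n = a.length)
    (hQ : ∀ i : Nat, i < n - 1 → ∃ j, i < j ∧ j < n ∧ a.getD i 0 < a.getD j 0) :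
    ∀ i : Nat, i < n - 1 → a.getD i 0 < a.getD (n - 1) 0 := by
  have main : ∀ d i, n - 1 - i ≤ d → i < n - 1 → a.getD i 0 < a.getD (n - 1) 0 := by
    intro d
    induction d with
    | zero => intro i hd hi; omega
    | succ d ih =>
        intro i hd hi
        obtain ⟨j, hij, hjn, hlt⟩ := hQ i hi
        by_cases hj : j = n - 1
        · rw [hj] at hlt; exact hlt
        · exact lt_trans hlt (ih j (by omega) (by omega))
  exact fun i hi => main (n - 1 - i) i le_rfl hi

theorem take_all_iff (a : List Int) (k : Nat) (hk : k ≤ a.length) (p : Int → Bool) :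
    ((a.take k).all p = true) ↔ ∀ i : Nat, i < k → p (a.getD i 0) = true := by
  rw [List.all_eq_true]
  constructor
  · intro h i hi
    have hi' : i < a.length := lt_of_lt_of_le hi hk
    have hlen : i < (a.take k).length := by simp [List.length_take]; omega
    have hmem : a.getD i 0 ∈ a.take k := by
      rw [List.getD_eq_getElem a 0 hi']
      have hg : (a.take k)[i] = a[i] := List.getElem_take
      exact hg ▸ List.getElem_mem hlen
    exact h _ hmem
  · intro h x hx
    obtain ⟨i, hi, rfl⟩ := List.mem_iff_getElem.mp hx
    have hlen : i < k := by simp [List.length_take] at hi; omega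
    have hi' : i < a.length := by simp [List.length_take] at hi; omega
    have := h i hlen
    rw [List.getD_eq_getElem a 0 hi'] at this
    have hg : (a.take k)[i] = a[i] := List.getElem_take
    rw [hg]
    exact this

theorem check_spec : Claim_equal_check := by
  intro a _
  show check a = check_alt a
  by_cases ha : a = []
  · subst ha; rfl
  · have h1 : 1 ≤ a.length := List.length_pos_iff.mpr ha
    set n := a.length with hn
    -- reduce A's side to a count over List.range
    have hA : check a =
        (if (((PySem.List.pyRange 0 (a.length : Int) 1).foldl
            (fun count i => checkInner a (PySem.List.pyGetD a i 0)
              (PySem.List.pyRange (i + 1) (a.length : Int) 1) count) 0) = (a.length : Int) - 1)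
         then "assendin" else "desending") := rfl
    rw [fold_count, PySem.List.pyRange_zero_natCast, List.countP_map, zero_add] at hA
    have hcomp : ((Qb a) ∘ fun k : Nat => (k : Int)) = fun i : Nat => Qb a (i : Int) := rfl
    rw [hcomp] at hA
    rw [← hn] at hA
    -- split off the last index, where Qb is false
    have hsplit : (List.range n).countP (fun i : Nat => Qb a (i : Int))
        = (List.range (n - 1)).countP (fun i : Nat => Qb a (i : Int)) := by
      conv_lhs => rw [show n = (n - 1) + 1 by omega, List.range_succ]
      rw [List.countP_append, List.countP_cons, List.countP_nil]
      rw [show ((n : Nat) - 1 : Nat) = a.length - 1 from by rw [hn]]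
      rw [Qb_last a ha]
      simp
    have hle : (List.range (n - 1)).countP (fun i : Nat => Qb a (i : Int)) ≤ n - 1 := by
      have h2 := List.countP_le_length (p := fun i : Nat => Qb a (i : Int)) (l := List.range (n - 1))
      simpa using h2
    -- the count condition ↔ every index before the last satisfies Qb
    have hcond : ((((List.range n).countP (fun i : Nat => Qb a (i : Int))) : Int) = (n : Int) - 1)
        ↔ (∀ i : Nat, i < n - 1 → Qb a (i : Int) = true) := by
      rw [hsplit]
      constructor
      · intro h
        have hc : (List.range (n - 1)).countP (fun i : Nat => Qb a (i : Int)) = n - 1 := by omega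
        have hall := (@List.countP_eq_length _ (List.range (n - 1))
          (fun i : Nat => Qb a (i : Int))).mp (by rw [hc, List.length_range])
        intro i hi
        exact hall i (List.mem_range.mpr hi)
      · intro h
        have hall := (@List.countP_eq_length _ (List.range (n - 1))
          (fun i : Nat => Qb a (i : Int))).mpr (fun i hi => h i (List.mem_range.mp hi))
        rw [List.length_range] at hall
        omega
    -- ∀-Qb ↔ every earlier element is below the last
    have hiff : (∀ i : Nat, i < n - 1 → Qb a (i : Int) = true)
        ↔ (∀ i : Nat, i < n - 1 → a.getD i 0 < a.getD (n - 1) 0) := by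
      constructor
      · intro h
        exact all_lt_last a n hn (fun i hi => by
          have := (Qb_nat_iff a i).mp (h i hi)
          obtain ⟨j, h1, h2, h3⟩ := this
          exact ⟨j, h1, by omega, h3⟩)
      · intro h i hi
        refine (Qb_nat_iff a i).mpr ⟨n - 1, by omega, by omega, h i hi⟩
    -- B's side
    have hB : check_alt a =
        (if (a.take (n - 1)).all (fun x => decide (x < a.getLast ha)) then "assendin"
         else "desending") := by
      unfold check_alt
      rw [dif_neg ha]
      have hm1 : (-1 : Int) = -((1 : Nat) : Int) := by norm_num
      rw [PySem.List.pyGetD_neg_one a 0 ha, hm1, PySem.List.slice_to_neg_natCast a 1 (by omega)]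
    have hlast : a.getLast ha = a.getD (n - 1) 0 := by
      rw [List.getLast_eq_getElem, List.getD_eq_getElem a 0 (by omega)]
    have hBcond : ((a.take (n - 1)).all (fun x => decide (x < a.getLast ha)) = true)
        ↔ (∀ i : Nat, i < n - 1 → a.getD i 0 < a.getD (n - 1) 0) := by
      rw [take_all_iff a (n - 1) (by omega)]
      simp [hlast]
    rw [hA, hB]
    by_cases hc : (((List.range n).countP (fun i : Nat => Qb a (i : Int))) : Int) = (n : Int) - 1
    · rw [if_pos hc, if_pos (hBcond.mpr (hiff.mp (hcond.mp hc)))]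
    · rw [if_neg hc, if_neg (fun hb => hc (hcond.mpr (hiff.mpr (hBcond.mp hb))))]
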